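-- pv_equiv track=rewrite | github.com/vedkharche538/CompanyWiseCodingProblems | Recurssion/unique_3_digit_numbers.py | unique_3_digit_even_numbers
-- ===== SOURCE A (Python) =====
-- def unique_3_digit_even_numbers(digits):
--     ans = set()
--     def backtrack(path, used):
--         if len(path) == 3:
--             if path[-1] % 2 == 0:
--                 num = path[0]*100 + path[1]*10 + path[2]
--                 ans.add(num)
--             return
--         for i in range(len(digits)):
--             if used[i]:
--                 continue
--             # Skip leading zero
--             if len(path) == 0 and digits[i] == 0:
--                 continue
--             used[i] = True
--             backtrack(path + [digits[i]], used)
--             used[i] = False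
--     backtrack([], [False]*len(digits))
--     return sorted(ans)
-- ===== SOURCE B (Python) =====
-- def unique_3_digit_even_numbers(digits):
--     counts = {}
--     for d in digits:
--         counts[d] = counts.get(d, 0) + 1
--     ans = set()
--     for a in counts:
--         if a == 0:
--             continue
--         for b in counts:
--             for c in counts:
--                 if c % 2 != 0:
--                     continue
--                 if (counts[a] >= 1 + (b == a) + (c == a)
--                         and counts[b] >= (a == b) + 1 + (c == b)
--                         and counts[c] >= (a == c) + (b == c) + 1):
--                     ans.add(a * 100 + b * 10 + c)
--     return sorted(ans)
-- ===== Notes on version B (the rewrite author's own statement) =====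
-- stated objective: alternative
-- what changed: B replaces A's backtracking over index permutations (with a mutable 'used' array) by a counting dictionary over the distinct digit values: it enumerates value triples over the distinct values only and checks multiplicity constraints against the counts (cheaper when values repeat, as for actual digits; same cost when all values are distinct).
import Mathlib
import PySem

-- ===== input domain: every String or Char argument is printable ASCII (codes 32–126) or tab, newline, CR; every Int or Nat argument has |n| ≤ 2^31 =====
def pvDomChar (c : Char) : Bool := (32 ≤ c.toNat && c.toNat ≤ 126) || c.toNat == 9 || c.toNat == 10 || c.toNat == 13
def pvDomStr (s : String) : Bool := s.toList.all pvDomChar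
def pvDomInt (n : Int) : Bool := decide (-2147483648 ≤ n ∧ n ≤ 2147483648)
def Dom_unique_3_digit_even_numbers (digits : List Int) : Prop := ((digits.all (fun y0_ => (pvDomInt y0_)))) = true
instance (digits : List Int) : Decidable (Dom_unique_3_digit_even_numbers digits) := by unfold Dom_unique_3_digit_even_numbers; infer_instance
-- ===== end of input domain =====

-- B replaces A's index backtracking (mutable 'used' array) by a counting dictionary
-- over the distinct digit values: it enumerates value triples over the distinct values
-- only, checking multiplicity constraints against the counts.

-- ===== PORT A =====
-- literal port of A's nested `backtrack`; `fuel` (= 3 - len(path)) only makes the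
-- recursion structural, it never cuts a branch the Python explores
def pvBT (digits : List Int) : Nat → List Int → List Bool → PySem.Set Int → PySem.Set Int
  | fuel, path, used, ans =>
    if path.length = 3 then
      if PySem.Int.mod (PySem.List.pyGetD path (-1) 0) 2 = 0 then
        PySem.Set.add ans (PySem.List.pyGetD path 0 0 * 100 + PySem.List.pyGetD path 1 0 * 10 + PySem.List.pyGetD path 2 0)
      else ans
    else
      match fuel with
      | 0 => ans
      | f + 1 =>
        (PySem.List.pyRange 0 (digits.length : Int) 1).foldl (fun acc i =>
          if PySem.List.pyGetD used i false then acc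
          else if path.length = 0 ∧ PySem.List.pyGetD digits i 0 = 0 then acc
          else pvBT digits f (path ++ [PySem.List.pyGetD digits i 0]) (PySem.List.pySetD used i true) acc) ans

def unique_3_digit_even_numbers (digits : List Int) : List Int :=
  PySem.List.sorted (pvBT digits 3 [] (List.replicate digits.length false) PySem.Set.empty) (fun x => x) false

-- ===== PORT B =====
-- Python's int(bool) used in the count comparisons
def pvBoolInt (b : Bool) : Int := if b then 1 else 0

def unique_3_digit_even_numbers_alt (digits : List Int) : List Int :=
  let counts := digits.foldl (fun d x => d.insert x (d.getD x 0 + 1)) PySem.Dict.empty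
  let ans := counts.keys.foldl (fun s1 a =>
    if a = 0 then s1 else
    counts.keys.foldl (fun s2 b =>
      counts.keys.foldl (fun s3 c =>
        if PySem.Int.mod c 2 ≠ 0 then s3
        else if counts.getD a 0 ≥ 1 + pvBoolInt (b == a) + pvBoolInt (c == a) ∧
                counts.getD b 0 ≥ pvBoolInt (a == b) + 1 + pvBoolInt (c == b) ∧
                counts.getD c 0 ≥ pvBoolInt (a == c) + pvBoolInt (b == c) + 1 then
          PySem.Set.add s3 (a * 100 + b * 10 + c)
        else s3) s2) s1) PySem.Set.empty
  PySem.List.sorted ans (fun x => x) false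

-- ===== PRECONDITION & SPEC =====
def Spec_unique_3_digit_even_numbers (digits : List Int) (out : List Int) : Prop := out = unique_3_digit_even_numbers_alt digits
instance (digits : List Int) (out : List Int) : Decidable (Spec_unique_3_digit_even_numbers digits out) := by unfold Spec_unique_3_digit_even_numbers; infer_instance

-- ===== CLAIM (what is proved, stated in full; the proofs are below) =====
def Claim_equal_unique_3_digit_even_numbers : Prop := ∀ (digits : List Int), Dom_unique_3_digit_even_numbers digits → Spec_unique_3_digit_even_numbers digits (unique_3_digit_even_numbers digits)

-- ===== LEMMAS AND PROOFS =====

-- membership in a fold that only extends the accumulator set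
lemma pv_mem_foldl {β : Type} (l : List β) (f : List Int → β → List Int) (Q : β → Int → Prop)
    (hf : ∀ s x, x ∈ l → ∀ m, (m ∈ f s x ↔ m ∈ s ∨ Q x m)) :
    ∀ s m, m ∈ l.foldl f s ↔ m ∈ s ∨ ∃ x ∈ l, Q x m := by
  induction l with
  | nil => intro s m; simp
  | cons y t ih =>
    intro s m
    rw [List.foldl_cons,
      ih (fun s x hx m => hf s x (List.mem_cons_of_mem _ hx) m),
      hf s y (List.mem_cons_self ..)]
    simp only [List.mem_cons]
    constructor
    · rintro ((h | h) | ⟨x, hx, hq⟩)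
      exacts [Or.inl h, Or.inr ⟨y, Or.inl rfl, h⟩, Or.inr ⟨x, Or.inr hx, hq⟩]
    · rintro (h | ⟨x, (rfl | hx), hq⟩)
      exacts [Or.inl (Or.inl h), Or.inl (Or.inr hq), Or.inr ⟨x, hx, hq⟩]

lemma pv_nodup_foldl {β : Type} (l : List β) (f : List Int → β → List Int)
    (hf : ∀ s x, s.Nodup → (f s x).Nodup) :
    ∀ s, s.Nodup → (l.foldl f s).Nodup := by
  induction l with
  | nil => intro s hs; simpa using hs
  | cons y t ih => intro s hs; rw [List.foldl_cons]; exact ih _ (hf s y hs)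

lemma pv_getD_mem {l : List Int} {i : ℕ} (hi : i < l.length) : l.getD i 0 ∈ l := by
  rw [List.getD_eq_getElem l 0 hi]; exact List.getElem_mem hi

lemma pv_mem_iff_getD {l : List Int} {a : Int} : a ∈ l ↔ ∃ i, i < l.length ∧ l.getD i 0 = a := by
  constructor
  · intro h
    obtain ⟨i, hi, he⟩ := List.mem_iff_getElem.mp h
    exact ⟨i, hi, by rw [List.getD_eq_getElem l 0 hi, he]⟩
  · rintro ⟨i, hi, he⟩
    rw [← he]; exact pv_getD_mem hi

lemma pv_two_le_count {l : List Int} {v : Int} {i j : ℕ} (hi : i < l.length) (hj : j < l.length)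
    (hij : i ≠ j) (ha : l.getD i 0 = v) (hb : l.getD j 0 = v) : 2 ≤ l.count v := by
  induction l generalizing i j with
  | nil => simp at hi
  | cons x t ih =>
    simp only [List.length_cons] at hi hj
    match i, j with
    | 0, 0 => exact absurd rfl hij
    | 0, j + 1 =>
      simp only [List.getD_cons_zero] at ha
      simp only [List.getD_cons_succ] at hb
      have hm : v ∈ t := hb ▸ pv_getD_mem (by omega)
      have := List.count_pos_iff.mpr hm
      simp [ha]; omega
    | i + 1, 0 =>
      simp only [List.getD_cons_zero] at hb
      simp only [List.getD_cons_succ] at ha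
      have hm : v ∈ t := ha ▸ pv_getD_mem (by omega)
      have := List.count_pos_iff.mpr hm
      simp [hb]; omega
    | i + 1, j + 1 =>
      simp only [List.getD_cons_succ] at ha hb
      have := ih (by omega) (by omega) (by omega) ha hb
      simp [List.count_cons]; omega

lemma pv_three_le_count {l : List Int} {v : Int} {i j k : ℕ} (hi : i < l.length) (hj : j < l.length)
    (hk : k < l.length) (hij : i ≠ j) (hik : i ≠ k) (hjk : j ≠ k)
    (ha : l.getD i 0 = v) (hb : l.getD j 0 = v) (hc : l.getD k 0 = v) : 3 ≤ l.count v := by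
  induction l generalizing i j k with
  | nil => simp at hi
  | cons x t ih =>
    simp only [List.length_cons] at hi hj hk
    match i, j, k with
    | 0, 0, _ => exact absurd rfl hij
    | 0, _, 0 => exact absurd rfl hik
    | _, 0, 0 => exact absurd rfl hjk
    | 0, j + 1, k + 1 =>
      simp only [List.getD_cons_zero] at ha
      simp only [List.getD_cons_succ] at hb hc
      have := pv_two_le_count (l := t) (by omega) (by omega) (by omega) hb hc
      simp [ha]; omega
    | i + 1, 0, k + 1 =>
      simp only [List.getD_cons_zero] at hb
      simp only [List.getD_cons_succ] at ha hc
      have := pv_two_le_count (l := t) (by omega) (by omega) (by omega) ha hc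
      simp [hb]; omega
    | i + 1, j + 1, 0 =>
      simp only [List.getD_cons_zero] at hc
      simp only [List.getD_cons_succ] at ha hb
      have := pv_two_le_count (l := t) (by omega) (by omega) (by omega) ha hb
      simp [hc]; omega
    | i + 1, j + 1, k + 1 =>
      simp only [List.getD_cons_succ] at ha hb hc
      have := ih (by omega) (by omega) (by omega) (by omega) (by omega) (by omega) ha hb hc
      simp [List.count_cons]; omega

lemma pv_exists_two {l : List Int} {v : Int} (h : 2 ≤ l.count v) :
    ∃ i j, i < l.length ∧ j < l.length ∧ i ≠ j ∧ l.getD i 0 = v ∧ l.getD j 0 = v := by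
  induction l with
  | nil => simp at h
  | cons x t ih =>
    by_cases hx : x = v
    · have h1 : 1 ≤ t.count v := by simp [hx] at h ⊢; omega
      obtain ⟨i, hi, he⟩ := pv_mem_iff_getD.mp (List.count_pos_iff.mp h1)
      exact ⟨0, i + 1, by simp, by simpa using hi, by omega, by simpa using hx, by simpa using he⟩
    · have h2 : 2 ≤ t.count v := by simpa [List.count_cons, hx] using h
      obtain ⟨i, j, hi, hj, hij, ha, hb⟩ := ih h2
      exact ⟨i + 1, j + 1, by simpa using hi, by simpa using hj, by omega, by simpa using ha,
        by simpa using hb⟩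

lemma pv_exists_three {l : List Int} {v : Int} (h : 3 ≤ l.count v) :
    ∃ i j k, i < l.length ∧ j < l.length ∧ k < l.length ∧ i ≠ j ∧ i ≠ k ∧ j ≠ k ∧
      l.getD i 0 = v ∧ l.getD j 0 = v ∧ l.getD k 0 = v := by
  induction l with
  | nil => simp at h
  | cons x t ih =>
    by_cases hx : x = v
    · have h2 : 2 ≤ t.count v := by simp [hx] at h ⊢; omega
      obtain ⟨i, j, hi, hj, hij, ha, hb⟩ := pv_exists_two h2
      exact ⟨0, i + 1, j + 1, by simp, by simpa using hi, by simpa using hj, by omega, by omega,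
        by omega, by simpa using hx, by simpa using ha, by simpa using hb⟩
    · have h3 : 3 ≤ t.count v := by simpa [List.count_cons, hx] using h
      obtain ⟨i, j, k, hi, hj, hk, hij, hik, hjk, ha, hb, hc⟩ := ih h3
      exact ⟨i + 1, j + 1, k + 1, by simpa using hi, by simpa using hj, by simpa using hk,
        by omega, by omega, by omega, by simpa using ha, by simpa using hb, by simpa using hc⟩

lemma pv_getD_set_ne (u : List Bool) {i k : ℕ} (h : i ≠ k) :
    (u.set i true).getD k false = u.getD k false := by
  simp [List.getD_eq_getElem?_getD, List.getElem?_set_ne h]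

lemma pv_getD_set_self (u : List Bool) {i : ℕ} (hi : i < u.length) :
    (u.set i true).getD i false = true := by
  simp [List.getD_eq_getElem?_getD, hi]

lemma pv_memBT1 (digits : List Int) (used : List Bool) (a b : Int) (s : PySem.Set Int) (m : Int) :
    m ∈ pvBT digits 1 [a, b] used s ↔ m ∈ s ∨
      ∃ k, k < digits.length ∧ used.getD k false = false ∧
        PySem.Int.mod (digits.getD k 0) 2 = 0 ∧ m = a * 100 + b * 10 + digits.getD k 0 := by
  rw [pvBT]
  rw [if_neg (by simp)]
  rw [pv_mem_foldl _ _
    (fun x m => x.toNat < digits.length ∧ used.getD x.toNat false = false ∧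
      PySem.Int.mod (digits.getD x.toNat 0) 2 = 0 ∧
      m = a * 100 + b * 10 + digits.getD x.toNat 0) ?hf s m]
  case hf =>
    intro s x hx m
    obtain ⟨hx0, hxn⟩ := (PySem.List.mem_pyRange_one).mp hx
    obtain ⟨k, rfl⟩ := Int.eq_ofNat_of_zero_le hx0
    have hk : k < digits.length := by exact_mod_cast hxn
    have husedk : PySem.List.pyGetD used (k : Int) false = used.getD k false :=
      PySem.List.pyGetD_natCast ..
    have e0 : PySem.List.pyGetD ([a, b] ++ [PySem.List.pyGetD digits (k : Int) 0]) 0 0 = a := rfl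
    have e1 : PySem.List.pyGetD ([a, b] ++ [PySem.List.pyGetD digits (k : Int) 0]) 1 0 = b := rfl
    have e2 : PySem.List.pyGetD ([a, b] ++ [PySem.List.pyGetD digits (k : Int) 0]) 2 0 =
        PySem.List.pyGetD digits (k : Int) 0 := rfl
    have edg : PySem.List.pyGetD digits (k : Int) 0 = digits.getD k 0 :=
      PySem.List.pyGetD_natCast ..
    rcases hu : used.getD k false with _ | _
    · rw [if_neg (by rw [husedk, hu]; simp), if_neg (by simp)]
      rw [pvBT, if_pos (by simp)]
      rw [PySem.List.pyGetD_neg_one_append_singleton, e0, e1, e2, edg]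
      split_ifs with hev
      · simp only [PySem.Set.mem_add, Int.toNat_natCast]
        constructor
        · rintro (h | rfl)
          · exact Or.inl h
          · exact Or.inr ⟨hk, hu, hev, rfl⟩
        · rintro (h | ⟨_, _, _, rfl⟩)
          · exact Or.inl h
          · exact Or.inr rfl
      · simp only [Int.toNat_natCast]
        constructor
        · exact Or.inl
        · rintro (h | ⟨_, _, hev2, _⟩)
          · exact h
          · exact absurd hev2 hev
    · rw [if_pos (by rw [husedk, hu])]
      simp only [Int.toNat_natCast, hu]
      constructor
      · exact Or.inl
      · rintro (h | ⟨_, h2, _⟩)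
        · exact h
        · simp at h2
  · constructor
    · rintro (h | ⟨x, hx, hk, h2, h3, h4⟩)
      · exact Or.inl h
      · exact Or.inr ⟨x.toNat, hk, h2, h3, h4⟩
    · rintro (h | ⟨k, hk, h2, h3, h4⟩)
      · exact Or.inl h
      · refine Or.inr ⟨(k : Int), PySem.List.mem_pyRange_one.mpr ⟨by omega, by exact_mod_cast hk⟩, ?_⟩
        simp only [Int.toNat_natCast]
        exact ⟨hk, h2, h3, h4⟩

lemma pv_memBT2 (digits : List Int) (used : List Bool) (hu : used.length = digits.length)
    (a : Int) (s : PySem.Set Int) (m : Int) :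
    m ∈ pvBT digits 2 [a] used s ↔ m ∈ s ∨
      ∃ j, j < digits.length ∧ used.getD j false = false ∧
      ∃ k, k < digits.length ∧ k ≠ j ∧ used.getD k false = false ∧
        PySem.Int.mod (digits.getD k 0) 2 = 0 ∧
        m = a * 100 + digits.getD j 0 * 10 + digits.getD k 0 := by
  rw [pvBT, if_neg (by simp)]
  rw [pv_mem_foldl _ _
    (fun x m => x.toNat < digits.length ∧ used.getD x.toNat false = false ∧
      ∃ k, k < digits.length ∧ k ≠ x.toNat ∧ used.getD k false = false ∧
        PySem.Int.mod (digits.getD k 0) 2 = 0 ∧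
        m = a * 100 + digits.getD x.toNat 0 * 10 + digits.getD k 0) ?hf s m]
  case hf =>
    intro s x hx m
    obtain ⟨hx0, hxn⟩ := (PySem.List.mem_pyRange_one).mp hx
    obtain ⟨j, rfl⟩ := Int.eq_ofNat_of_zero_le hx0
    have hj : j < digits.length := by exact_mod_cast hxn
    have husedj : PySem.List.pyGetD used (j : Int) false = used.getD j false :=
      PySem.List.pyGetD_natCast ..
    have edg : PySem.List.pyGetD digits (j : Int) 0 = digits.getD j 0 :=
      PySem.List.pyGetD_natCast ..
    rcases huj : used.getD j false with _ | _
    · rw [if_neg (by rw [husedj, huj]; simp), if_neg (by simp)]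
      rw [show PySem.List.pySetD used (j : Int) true = used.set j true from
        PySem.List.pySetD_natCast ..]
      rw [show ([a] ++ [PySem.List.pyGetD digits (j : Int) 0]) =
        [a, PySem.List.pyGetD digits (j : Int) 0] from rfl]
      rw [pv_memBT1]
      simp only [Int.toNat_natCast, edg]
      constructor
      · rintro (h | ⟨k, hk, hsk, hev, rfl⟩)
        · exact Or.inl h
        · have hkj : k ≠ j := by
            intro h'
            subst h'
            rw [pv_getD_set_self used (by omega)] at hsk
            simp at hsk
          rw [pv_getD_set_ne used (Ne.symm hkj)] at hsk
          exact Or.inr ⟨hj, huj, k, hk, hkj, hsk, hev, rfl⟩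
      · rintro (h | ⟨_, _, k, hk, hkj, hsk, hev, rfl⟩)
        · exact Or.inl h
        · refine Or.inr ⟨k, hk, ?_, hev, rfl⟩
          rw [pv_getD_set_ne used (Ne.symm hkj)]; exact hsk
    · rw [if_pos (by rw [husedj, huj])]
      constructor
      · exact Or.inl
      · rintro (h | ⟨_, h2, _⟩)
        · exact h
        · simp only [Int.toNat_natCast] at h2
          rw [huj] at h2
          simp at h2
  · constructor
    · rintro (h | ⟨x, hx, h1, h2, rest⟩)
      · exact Or.inl h
      · exact Or.inr ⟨x.toNat, h1, h2, rest⟩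
    · rintro (h | ⟨j, hjn, h2, rest⟩)
      · exact Or.inl h
      · refine Or.inr ⟨(j : Int), PySem.List.mem_pyRange_one.mpr ⟨by omega, by exact_mod_cast hjn⟩, ?_⟩
        simp only [Int.toNat_natCast]
        exact ⟨hjn, h2, rest⟩

lemma pv_memBT3 (digits : List Int) (used : List Bool) (hu : used.length = digits.length)
    (s : PySem.Set Int) (m : Int) :
    m ∈ pvBT digits 3 [] used s ↔ m ∈ s ∨
      ∃ i, i < digits.length ∧ used.getD i false = false ∧ digits.getD i 0 ≠ 0 ∧
      ∃ j, j < digits.length ∧ j ≠ i ∧ used.getD j false = false ∧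
      ∃ k, k < digits.length ∧ k ≠ i ∧ k ≠ j ∧ used.getD k false = false ∧
        PySem.Int.mod (digits.getD k 0) 2 = 0 ∧
        m = digits.getD i 0 * 100 + digits.getD j 0 * 10 + digits.getD k 0 := by
  rw [pvBT, if_neg (by simp)]
  rw [pv_mem_foldl _ _
    (fun x m => x.toNat < digits.length ∧ used.getD x.toNat false = false ∧
      digits.getD x.toNat 0 ≠ 0 ∧
      ∃ j, j < digits.length ∧ j ≠ x.toNat ∧ used.getD j false = false ∧
      ∃ k, k < digits.length ∧ k ≠ x.toNat ∧ k ≠ j ∧ used.getD k false = false ∧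
        PySem.Int.mod (digits.getD k 0) 2 = 0 ∧
        m = digits.getD x.toNat 0 * 100 + digits.getD j 0 * 10 + digits.getD k 0) ?hf s m]
  case hf =>
    intro s x hx m
    obtain ⟨hx0, hxn⟩ := (PySem.List.mem_pyRange_one).mp hx
    obtain ⟨i, rfl⟩ := Int.eq_ofNat_of_zero_le hx0
    have hi : i < digits.length := by exact_mod_cast hxn
    have husedi : PySem.List.pyGetD used (i : Int) false = used.getD i false :=
      PySem.List.pyGetD_natCast ..
    have edg : PySem.List.pyGetD digits (i : Int) 0 = digits.getD i 0 :=
      PySem.List.pyGetD_natCast ..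
    rcases hui : used.getD i false with _ | _
    · by_cases hz : digits.getD i 0 = 0
      · rw [if_neg (by rw [husedi, hui]; simp), if_pos (by rw [edg]; simpa using hz)]
        constructor
        · exact Or.inl
        · rintro (h | ⟨_, _, h3, _⟩)
          · exact h
          · simp only [Int.toNat_natCast] at h3
            exact absurd hz h3
      · rw [if_neg (by rw [husedi, hui]; simp), if_neg (by rw [edg]; simpa using hz)]
        rw [show ([] ++ [PySem.List.pyGetD digits (i : Int) 0]) =
          [PySem.List.pyGetD digits (i : Int) 0] from rfl]
        rw [show PySem.List.pySetD used (i : Int) true = used.set i true from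
          PySem.List.pySetD_natCast ..]
        rw [pv_memBT2 digits _ (by simpa using hu)]
        simp only [Int.toNat_natCast, edg]
        constructor
        · rintro (h | ⟨j, hjn, hsj, k, hk, hkj, hsk, hev, rfl⟩)
          · exact Or.inl h
          · have hji : j ≠ i := by
              intro h'; subst h'
              rw [pv_getD_set_self used (by omega)] at hsj; simp at hsj
            have hki : k ≠ i := by
              intro h'; subst h'
              rw [pv_getD_set_self used (by omega)] at hsk; simp at hsk
            rw [pv_getD_set_ne used (Ne.symm hji)] at hsj
            rw [pv_getD_set_ne used (Ne.symm hki)] at hsk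
            exact Or.inr ⟨hi, hui, hz, j, hjn, hji, hsj, k, hk, hki, hkj, hsk, hev, rfl⟩
        · rintro (h | ⟨_, _, _, j, hjn, hji, hsj, k, hk, hki, hkj, hsk, hev, rfl⟩)
          · exact Or.inl h
          · refine Or.inr ⟨j, hjn, ?_, k, hk, hkj, ?_, hev, rfl⟩
            · rw [pv_getD_set_ne used (Ne.symm hji)]; exact hsj
            · rw [pv_getD_set_ne used (Ne.symm hki)]; exact hsk
    · rw [if_pos (by rw [husedi, hui])]
      constructor
      · exact Or.inl
      · rintro (h | ⟨_, h2, _⟩)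
        · exact h
        · simp only [Int.toNat_natCast] at h2
          rw [hui] at h2
          simp at h2
  · constructor
    · rintro (h | ⟨x, hx, h1, h2, rest⟩)
      · exact Or.inl h
      · exact Or.inr ⟨x.toNat, h1, h2, rest⟩
    · rintro (h | ⟨i, hin, h2, rest⟩)
      · exact Or.inl h
      · refine Or.inr ⟨(i : Int), PySem.List.mem_pyRange_one.mpr ⟨by omega, by exact_mod_cast hin⟩, ?_⟩
        simp only [Int.toNat_natCast]
        exact ⟨hin, h2, rest⟩

-- A-side characterization
lemma pv_memA (digits : List Int) (m : Int) :
    m ∈ pvBT digits 3 [] (List.replicate digits.length false) PySem.Set.empty ↔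
      ∃ i, i < digits.length ∧ digits.getD i 0 ≠ 0 ∧
      ∃ j, j < digits.length ∧ j ≠ i ∧
      ∃ k, k < digits.length ∧ k ≠ i ∧ k ≠ j ∧ PySem.Int.mod (digits.getD k 0) 2 = 0 ∧
        m = digits.getD i 0 * 100 + digits.getD j 0 * 10 + digits.getD k 0 := by
  have hrep : ∀ t : ℕ, (List.replicate digits.length false).getD t false = false := by
    intro t
    rcases Nat.lt_or_ge t digits.length with h | h
    · simp [List.getD_eq_getElem?_getD, h]
    · have : (List.replicate digits.length false)[t]? = none :=
        List.getElem?_eq_none_iff.mpr (by simpa using h)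
      simp [List.getD_eq_getElem?_getD, this]
  rw [pv_memBT3 digits _ (by simp)]
  simp only [hrep]
  simp [PySem.Set.empty]

lemma pv_nodupBT (digits : List Int) : ∀ (fuel : ℕ) (path : List Int) (used : List Bool)
    (s : PySem.Set Int), s.Nodup → (pvBT digits fuel path used s).Nodup := by
  intro fuel
  induction fuel with
  | zero =>
    intro path used s hs
    rw [pvBT]
    split_ifs
    · exact PySem.Set.nodup_add _ _ hs
    · exact hs
    · exact hs
  | succ f ih =>
    intro path used s hs
    rw [pvBT]
    split_ifs
    · exact PySem.Set.nodup_add _ _ hs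
    · exact hs
    · refine pv_nodup_foldl _ _ (fun s x hsx => ?_) s hs
      split_ifs
      · exact hsx
      · exact hsx
      · exact ih _ _ _ hsx

lemma pv_nodupA (digits : List Int) :
    (pvBT digits 3 [] (List.replicate digits.length false) PySem.Set.empty).Nodup := by
  exact pv_nodupBT digits 3 [] _ _ List.nodup_nil

-- B-side characterization
lemma pv_memB1 (counts : PySem.Dict Int Int) (a b : Int) (s : PySem.Set Int) (m : Int) :
    m ∈ counts.keys.foldl (fun s3 c =>
        if PySem.Int.mod c 2 ≠ 0 then s3
        else if counts.getD a 0 ≥ 1 + pvBoolInt (b == a) + pvBoolInt (c == a) ∧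
                counts.getD b 0 ≥ pvBoolInt (a == b) + 1 + pvBoolInt (c == b) ∧
                counts.getD c 0 ≥ pvBoolInt (a == c) + pvBoolInt (b == c) + 1 then
          PySem.Set.add s3 (a * 100 + b * 10 + c)
        else s3) s ↔
      m ∈ s ∨ ∃ c ∈ counts.keys, PySem.Int.mod c 2 = 0 ∧
        (counts.getD a 0 ≥ 1 + pvBoolInt (b == a) + pvBoolInt (c == a) ∧
         counts.getD b 0 ≥ pvBoolInt (a == b) + 1 + pvBoolInt (c == b) ∧
         counts.getD c 0 ≥ pvBoolInt (a == c) + pvBoolInt (b == c) + 1) ∧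
        m = a * 100 + b * 10 + c := by
  rw [pv_mem_foldl _ _
    (fun c m => PySem.Int.mod c 2 = 0 ∧
      (counts.getD a 0 ≥ 1 + pvBoolInt (b == a) + pvBoolInt (c == a) ∧
       counts.getD b 0 ≥ pvBoolInt (a == b) + 1 + pvBoolInt (c == b) ∧
       counts.getD c 0 ≥ pvBoolInt (a == c) + pvBoolInt (b == c) + 1) ∧
      m = a * 100 + b * 10 + c) ?hf s m]
  case hf =>
    intro s c _ m
    split_ifs with h1 h2
    · constructor
      · exact Or.inl
      · rintro (h | ⟨hev, _⟩)
        · exact h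
        · exact absurd hev h1
    · rw [PySem.Set.mem_add]
      constructor
      · rintro (h | rfl)
        · exact Or.inl h
        · exact Or.inr ⟨not_not.mp h1, h2, rfl⟩
      · rintro (h | ⟨_, _, rfl⟩)
        · exact Or.inl h
        · exact Or.inr rfl
    · constructor
      · exact Or.inl
      · rintro (h | ⟨_, hcond, _⟩)
        · exact h
        · exact absurd hcond h2

lemma pv_memB0 (counts : PySem.Dict Int Int) (a : Int) (s : PySem.Set Int) (m : Int) :
    m ∈ counts.keys.foldl (fun s2 b =>
        counts.keys.foldl (fun s3 c =>
          if PySem.Int.mod c 2 ≠ 0 then s3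
          else if counts.getD a 0 ≥ 1 + pvBoolInt (b == a) + pvBoolInt (c == a) ∧
                  counts.getD b 0 ≥ pvBoolInt (a == b) + 1 + pvBoolInt (c == b) ∧
                  counts.getD c 0 ≥ pvBoolInt (a == c) + pvBoolInt (b == c) + 1 then
            PySem.Set.add s3 (a * 100 + b * 10 + c)
          else s3) s2) s ↔
      m ∈ s ∨ ∃ b ∈ counts.keys, ∃ c ∈ counts.keys, PySem.Int.mod c 2 = 0 ∧
        (counts.getD a 0 ≥ 1 + pvBoolInt (b == a) + pvBoolInt (c == a) ∧
         counts.getD b 0 ≥ pvBoolInt (a == b) + 1 + pvBoolInt (c == b) ∧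
         counts.getD c 0 ≥ pvBoolInt (a == c) + pvBoolInt (b == c) + 1) ∧
        m = a * 100 + b * 10 + c := by
  rw [pv_mem_foldl _ _
    (fun b m => ∃ c ∈ counts.keys, PySem.Int.mod c 2 = 0 ∧
      (counts.getD a 0 ≥ 1 + pvBoolInt (b == a) + pvBoolInt (c == a) ∧
       counts.getD b 0 ≥ pvBoolInt (a == b) + 1 + pvBoolInt (c == b) ∧
       counts.getD c 0 ≥ pvBoolInt (a == c) + pvBoolInt (b == c) + 1) ∧
      m = a * 100 + b * 10 + c) ?hf s m]
  case hf =>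
    intro s b _ m
    exact pv_memB1 counts a b s m

lemma pv_memB (digits : List Int) (m : Int) :
    m ∈ ((PySem.Dict.counter digits).keys.foldl (fun s1 a =>
          if a = 0 then s1 else
          (PySem.Dict.counter digits).keys.foldl (fun s2 b =>
            (PySem.Dict.counter digits).keys.foldl (fun s3 c =>
              if PySem.Int.mod c 2 ≠ 0 then s3
              else if (PySem.Dict.counter digits).getD a 0 ≥ 1 + pvBoolInt (b == a) + pvBoolInt (c == a) ∧
                      (PySem.Dict.counter digits).getD b 0 ≥ pvBoolInt (a == b) + 1 + pvBoolInt (c == b) ∧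
                      (PySem.Dict.counter digits).getD c 0 ≥ pvBoolInt (a == c) + pvBoolInt (b == c) + 1 then
                PySem.Set.add s3 (a * 100 + b * 10 + c)
              else s3) s2) s1) PySem.Set.empty) ↔
      ∃ a ∈ digits, a ≠ 0 ∧ ∃ b ∈ digits, ∃ c ∈ digits, PySem.Int.mod c 2 = 0 ∧
        (digits.count a ≥ 1 + pvBoolInt (b == a) + pvBoolInt (c == a) ∧
         digits.count b ≥ pvBoolInt (a == b) + 1 + pvBoolInt (c == b) ∧
         digits.count c ≥ pvBoolInt (a == c) + pvBoolInt (b == c) + 1) ∧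
        m = a * 100 + b * 10 + c := by
  rw [pv_mem_foldl _ _
    (fun a m => a ≠ 0 ∧ ∃ b ∈ (PySem.Dict.counter digits).keys, ∃ c ∈ (PySem.Dict.counter digits).keys,
      PySem.Int.mod c 2 = 0 ∧
      ((PySem.Dict.counter digits).getD a 0 ≥ 1 + pvBoolInt (b == a) + pvBoolInt (c == a) ∧
       (PySem.Dict.counter digits).getD b 0 ≥ pvBoolInt (a == b) + 1 + pvBoolInt (c == b) ∧
       (PySem.Dict.counter digits).getD c 0 ≥ pvBoolInt (a == c) + pvBoolInt (b == c) + 1) ∧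
      m = a * 100 + b * 10 + c) ?hf PySem.Set.empty m]
  case hf =>
    intro s a _ m
    split_ifs with hz
    · subst hz
      constructor
      · exact Or.inl
      · rintro (h | ⟨h0, _⟩)
        · exact h
        · exact absurd rfl h0
    · rw [pv_memB0]
      constructor
      · rintro (h | hq)
        · exact Or.inl h
        · exact Or.inr ⟨hz, hq⟩
      · rintro (h | ⟨_, hq⟩)
        · exact Or.inl h
        · exact Or.inr hq
  · simp only [PySem.Dict.getD_counter, PySem.Dict.keys_counter, PySem.Set.mem_ofList]
    simp [PySem.Set.empty]


lemma pv_nodupB (counts : PySem.Dict Int Int) :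
    (counts.keys.foldl (fun s1 a =>
      if a = 0 then s1 else
      counts.keys.foldl (fun s2 b =>
        counts.keys.foldl (fun s3 c =>
          if PySem.Int.mod c 2 ≠ 0 then s3
          else if counts.getD a 0 ≥ 1 + pvBoolInt (b == a) + pvBoolInt (c == a) ∧
                  counts.getD b 0 ≥ pvBoolInt (a == b) + 1 + pvBoolInt (c == b) ∧
                  counts.getD c 0 ≥ pvBoolInt (a == c) + pvBoolInt (b == c) + 1 then
            PySem.Set.add s3 (a * 100 + b * 10 + c)
          else s3) s2) s1) (PySem.Set.empty : PySem.Set Int)).Nodup := by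
  refine pv_nodup_foldl _ _ (fun s1 a hs1 => ?_) _ List.nodup_nil
  split_ifs
  · exact hs1
  · refine pv_nodup_foldl _ _ (fun s2 b hs2 => ?_) _ hs1
    refine pv_nodup_foldl _ _ (fun s3 c hs3 => ?_) _ hs2
    split_ifs
    · exact hs3
    · exact PySem.Set.nodup_add _ _ hs3
    · exact hs3

-- the combinatorial bridge: distinct indices ↔ multiplicity constraints on values
lemma pv_bi (x y : Int) : pvBoolInt (x == y) = if x = y then 1 else 0 := by
  by_cases h : x = y <;> simp [pvBoolInt, h]

lemma pv_bridge (digits : List Int) (m : Int) :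
    (∃ i, i < digits.length ∧ digits.getD i 0 ≠ 0 ∧
      ∃ j, j < digits.length ∧ j ≠ i ∧
      ∃ k, k < digits.length ∧ k ≠ i ∧ k ≠ j ∧ PySem.Int.mod (digits.getD k 0) 2 = 0 ∧
        m = digits.getD i 0 * 100 + digits.getD j 0 * 10 + digits.getD k 0) ↔
    (∃ a ∈ digits, a ≠ 0 ∧ ∃ b ∈ digits, ∃ c ∈ digits, PySem.Int.mod c 2 = 0 ∧
        (digits.count a ≥ 1 + pvBoolInt (b == a) + pvBoolInt (c == a) ∧
         digits.count b ≥ pvBoolInt (a == b) + 1 + pvBoolInt (c == b) ∧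
         digits.count c ≥ pvBoolInt (a == c) + pvBoolInt (b == c) + 1) ∧
        m = a * 100 + b * 10 + c) := by
  constructor
  · rintro ⟨i, hi, hz, j, hj, hji, k, hk, hki, hkj, hev, rfl⟩
    refine ⟨digits.getD i 0, pv_getD_mem hi, hz, digits.getD j 0, pv_getD_mem hj,
      digits.getD k 0, pv_getD_mem hk, hev, ⟨?_, ?_, ?_⟩, rfl⟩
    · rw [pv_bi, pv_bi]
      by_cases h1 : digits.getD j 0 = digits.getD i 0 <;>
        by_cases h2 : digits.getD k 0 = digits.getD i 0 <;>
        simp only [h1, h2, if_true, if_false]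
      · have := pv_three_le_count hi hj hk (fun h => hji h.symm) (fun h => hki h.symm) (fun h => hkj h.symm) rfl h1 h2
        omega
      · have := pv_two_le_count hi hj (fun h => hji h.symm) rfl h1; omega
      · have := pv_two_le_count hi hk (fun h => hki h.symm) rfl h2; omega
      · have := List.count_pos_iff.mpr (pv_getD_mem hi); omega
    · rw [pv_bi, pv_bi]
      by_cases h1 : digits.getD i 0 = digits.getD j 0 <;>
        by_cases h2 : digits.getD k 0 = digits.getD j 0 <;>
        simp only [h1, h2, if_true, if_false]
      · have := pv_three_le_count hj hi hk hji (fun h => hkj h.symm) (fun h => hki h.symm) rfl h1 h2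
        omega
      · have := pv_two_le_count hj hi hji rfl h1; omega
      · have := pv_two_le_count hj hk (fun h => hkj h.symm) rfl h2; omega
      · have := List.count_pos_iff.mpr (pv_getD_mem hj); omega
    · rw [pv_bi, pv_bi]
      by_cases h1 : digits.getD i 0 = digits.getD k 0 <;>
        by_cases h2 : digits.getD j 0 = digits.getD k 0 <;>
        simp only [h1, h2, if_true, if_false]
      · have := pv_three_le_count hk hi hj hki hkj (fun h => hji h.symm) rfl h1 h2
        omega
      · have := pv_two_le_count hk hi hki rfl h1; omega
      · have := pv_two_le_count hk hj hkj rfl h2; omega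
      · have := List.count_pos_iff.mpr (pv_getD_mem hk); omega
  · rintro ⟨a, hamem, hz, b, hbmem, c, hcmem, hev, ⟨h1, h2, h3⟩, rfl⟩
    rw [pv_bi, pv_bi] at h1 h2 h3
    by_cases hba : b = a
    · by_cases hca : c = a
      · -- a = b = c
        subst hba; subst hca
        have h3c : 3 ≤ digits.count c := by omega
        obtain ⟨i, j, k, hi, hj, hk, hij, hik, hjk, ha', hb', hc'⟩ := pv_exists_three h3c
        exact ⟨i, hi, by rwa [ha'], j, hj, fun h => hij h.symm, k, hk, fun h => hik h.symm,
          fun h => hjk h.symm, by rwa [hc'], by rw [ha', hb', hc']⟩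
      · -- a = b ≠ c
        subst hba
        rw [if_pos rfl, if_neg hca] at h1
        have h2b : 2 ≤ digits.count b := by omega
        obtain ⟨i, j, hi, hj, hij, ha', hb'⟩ := pv_exists_two h2b
        obtain ⟨k, hk, hc'⟩ := pv_mem_iff_getD.mp hcmem
        have hki : k ≠ i := fun h => hca (by rw [← hc', h, ha'])
        have hkj : k ≠ j := fun h => hca (by rw [← hc', h, hb'])
        exact ⟨i, hi, by rwa [ha'], j, hj, fun h => hij h.symm, k, hk, hki, hkj,
          by rwa [hc'], by rw [ha', hb', hc']⟩
    · by_cases hca : c = a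
      · -- a = c ≠ b
        subst hca
        rw [if_neg hba, if_pos rfl] at h1
        have h2c : 2 ≤ digits.count c := by omega
        obtain ⟨i, k, hi, hk, hik, ha', hc'⟩ := pv_exists_two h2c
        obtain ⟨j, hj, hb'⟩ := pv_mem_iff_getD.mp hbmem
        have hji : j ≠ i := fun h => hba (by rw [← hb', h, ha'])
        have hjk : k ≠ j := fun h => hba (by rw [← hb', ← h, hc'])
        exact ⟨i, hi, by rwa [ha'], j, hj, hji, k, hk, fun h => hik h.symm, hjk,
          by rwa [hc'], by rw [ha', hb', hc']⟩
      · by_cases hcb : c = b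
        · -- b = c, a distinct
          subst hcb
          rw [if_neg (fun h => hba h.symm), if_pos rfl] at h2
          have h2c : 2 ≤ digits.count c := by omega
          obtain ⟨j, k, hj, hk, hjk, hb', hc'⟩ := pv_exists_two h2c
          obtain ⟨i, hi, ha'⟩ := pv_mem_iff_getD.mp hamem
          have hji : j ≠ i := fun h => hba (by rw [← hb', h, ha'])
          have hki : k ≠ i := fun h => hca (by rw [← hc', h, ha'])
          exact ⟨i, hi, by rwa [ha'], j, hj, hji, k, hk, hki, fun h => hjk h.symm,
            by rwa [hc'], by rw [ha', hb', hc']⟩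
        · -- all distinct
          obtain ⟨i, hi, ha'⟩ := pv_mem_iff_getD.mp hamem
          obtain ⟨j, hj, hb'⟩ := pv_mem_iff_getD.mp hbmem
          obtain ⟨k, hk, hc'⟩ := pv_mem_iff_getD.mp hcmem
          have hji : j ≠ i := fun h => hba (by rw [← hb', h, ha'])
          have hki : k ≠ i := fun h => hca (by rw [← hc', h, ha'])
          have hkj : k ≠ j := fun h => hcb (by rw [← hc', h, hb'])
          exact ⟨i, hi, by rwa [ha'], j, hj, hji, k, hk, hki, hkj,
            by rwa [hc'], by rw [ha', hb', hc']⟩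

-- ===== VERDICT (by name: the statement is the Claim_ definition above) =====
theorem unique_3_digit_even_numbers_spec : Claim_equal_unique_3_digit_even_numbers := by
  intro digits _
  unfold Spec_unique_3_digit_even_numbers unique_3_digit_even_numbers unique_3_digit_even_numbers_alt
  apply PySem.List.sorted_eq_sorted_of_perm _ _ _ (fun a b h => h)
  refine (List.perm_ext_iff_of_nodup (pv_nodupA digits) (pv_nodupB _)).mpr ?_
  intro m
  exact (pv_memA digits m).trans ((pv_bridge digits m).trans (pv_memB digits m).symm)
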